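-- pv_equiv track=rewrite | github.com/daniel-reich/ubiquitous-fiesta | vudQZFD64nDWkKz8a_19.py | grant_the_hint
-- ===== SOURCE A (Python) =====
-- def grant_the_hint(txt):
--   split = txt.split()
--   maximum = max([len(x) for x in split])
--
--   ret = []
--
--   for i in range(0, maximum + 1):
--     app = ""
--
--     for word in split:
--       tmp = ""
--       for j, char in enumerate(word):
--         if j < i:
--           tmp += char
--         else:
--           tmp += '_'
--       app += tmp + ' '
--
--     ret.append(app[:len(app) - 1])
--
--   return ret
-- ===== SOURCE B (Python) =====
-- def grant_the_hint(txt):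
--     words = txt.split()
--     maximum = max(len(w) for w in words)
--     bufs = [['_'] * len(w) for w in words]
--     out = [' '.join(''.join(b) for b in bufs)]
--     for p in range(maximum):
--         for w, b in zip(words, bufs):
--             if p < len(w):
--                 b[p] = w[p]
--         out.append(' '.join(''.join(b) for b in bufs))
--     return out
-- ===== Notes on version B (the rewrite author's own statement) =====
-- stated objective: faster
-- what changed: B keeps one mutable underscore buffer per word and reveals one column per step (position-major, incremental), joining with ' '.join, instead of A's hint-major recomputation of every character of every word for each hint index.
import Mathlib
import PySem

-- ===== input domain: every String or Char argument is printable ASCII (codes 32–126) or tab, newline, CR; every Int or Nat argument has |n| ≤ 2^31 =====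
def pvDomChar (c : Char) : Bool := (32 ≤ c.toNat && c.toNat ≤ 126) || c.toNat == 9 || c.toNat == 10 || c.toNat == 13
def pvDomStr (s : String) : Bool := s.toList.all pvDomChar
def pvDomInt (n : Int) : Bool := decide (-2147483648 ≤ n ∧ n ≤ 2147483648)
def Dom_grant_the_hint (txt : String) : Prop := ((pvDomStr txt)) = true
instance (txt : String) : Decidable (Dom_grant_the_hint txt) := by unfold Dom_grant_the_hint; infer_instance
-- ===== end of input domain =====

-- B replaces A's hint-major recomputation of every character by one persistent underscore
-- buffer per word, revealed one column per step and joined with ' '.join (constant-factor change).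

-- ===== PORT A =====
-- inner 'for j, char in enumerate(word): tmp += char if j < i else "_"'
def pvHintWordA (i : Int) (word : List Char) : List Char :=
  (PySem.List.enumerate word).foldl
    (fun tmp jc => if jc.1 < i then tmp ++ [jc.2] else tmp ++ ['_']) []

def grant_the_hint (txt : String) : List String :=
  let split := PySem.Chars.split₀ txt.toList
  match PySem.List.max? (split.map (fun x => (x.length : Int))) (fun x => x) with
  | none => []   -- Python's max([]) raises ValueError here; excluded by Pre_
  | some maximum =>
    (PySem.List.pyRange 0 (maximum + 1)).foldl
      (fun ret i =>
        let app := split.foldl (fun app word => app ++ (pvHintWordA i word ++ [' '])) []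
        ret ++ [String.ofList (PySem.List.slice app none (some ((app.length : Int) - 1)))])
      []

-- ===== PORT B =====
-- "' '.join(''.join(b) for b in bufs)"  (''.join of a char list is the list itself)
def pvRender (bufs : List (List Char)) : String :=
  String.ofList (PySem.Chars.join [' '] bufs)

-- "if p < len(w): b[p] = w[p]"
def pvRevealCol (p : Nat) (wb : List Char × List Char) : List Char :=
  if p < wb.1.length then wb.2.set p (wb.1.getD p '_') else wb.2

def grant_the_hint_alt (txt : String) : List String :=
  let words := PySem.Chars.split₀ txt.toList
  match PySem.List.max? (words.map (fun w => (w.length : Int))) (fun x => x) with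
  | none => []   -- Python's max of an empty generator raises ValueError here; excluded by Pre_
  | some maximum =>
    let bufs := words.map (fun w => List.replicate w.length '_')
    let st := (List.range maximum.toNat).foldl
      (fun (st : List (List Char) × List String) p =>
        let bufs' := (words.zip st.1).map (fun wb => pvRevealCol p wb)
        (bufs', st.2 ++ [pvRender bufs']))
      (bufs, [pvRender bufs])
    st.2

-- ===== PRECONDITION & SPEC =====
-- Pre_ excludes exactly whitespace-only txt: there txt.split() is empty and Python's max raises ValueError.
def Pre_grant_the_hint (txt : String) : Prop := PySem.Chars.split₀ txt.toList ≠ []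
instance (txt : String) : Decidable (Pre_grant_the_hint txt) := by unfold Pre_grant_the_hint; infer_instance
def pvWitness_grant_the_hint : String := "hello you"
def Spec_grant_the_hint (txt : String) (out : List String) : Prop := out = grant_the_hint_alt txt
instance (txt : String) (out : List String) : Decidable (Spec_grant_the_hint txt out) := by unfold Spec_grant_the_hint; infer_instance

-- ===== CLAIM (what is proved, stated in full; the proofs are below) =====
def Claim_equal_grant_the_hint : Prop := ∀ (txt : String), Dom_grant_the_hint txt → Pre_grant_the_hint txt → Spec_grant_the_hint txt (grant_the_hint txt)

-- ===== LEMMAS AND PROOFS =====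

-- the i-th hint of a single word: first i characters revealed, the rest underscores
def pvReveal (i : Nat) (w : List Char) : List Char :=
  w.take i ++ List.replicate (w.length - i) '_'

def pvRow (ws : List (List Char)) (i : Nat) : List Char :=
  PySem.Chars.join [' '] (ws.map (pvReveal i))

theorem pvHintWordA_go (i : Int) (w : List Char) : ∀ (s : Int) (acc : List Char),
    (PySem.List.enumerate w s).foldl
      (fun tmp jc => if jc.1 < i then tmp ++ [jc.2] else tmp ++ ['_']) acc
    = acc ++ w.take (i - s).toNat ++ List.replicate (w.length - (i - s).toNat) '_' := by
  induction w with
  | nil => intro s acc; simp [PySem.List.enumerate]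
  | cons c w ih =>
    intro s acc
    rw [PySem.List.enumerate_cons, List.foldl_cons, ih (s + 1)]
    by_cases h : s < i
    · have h1 : (i - s).toNat = (i - (s + 1)).toNat + 1 := by omega
      have h2 : (c :: w).length - (i - s).toNat = w.length - (i - (s + 1)).toNat := by
        simp only [List.length_cons]; omega
      simp only [if_pos h, h1, List.take_succ_cons, List.append_assoc, List.cons_append,
        List.nil_append]
      have h3 : (c :: w).length - ((i - (s + 1)).toNat + 1) = w.length - (i - (s + 1)).toNat := by
        simp only [List.length_cons]; omega
      rw [h3]
    · have h1 : (i - s).toNat = 0 := by omega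
      have h2 : (i - (s + 1)).toNat = 0 := by omega
      simp only [if_neg h, h1, h2, List.take_zero, List.length_cons, Nat.sub_zero,
        List.replicate_succ, List.append_assoc, List.singleton_append, List.append_nil]

theorem pvHintWordA_eq (i : Int) (w : List Char) :
    pvHintWordA i w = pvReveal i.toNat w := by
  unfold pvHintWordA pvReveal
  rw [pvHintWordA_go i w 0 []]
  simp

-- a flatMap of word-plus-space with the last character cut is a space-join
theorem pvFlatJoin (f : List Char → List Char) (ws : List (List Char)) (h : ws ≠ []) :
    (ws.flatMap (fun w => f w ++ [' '])).dropLast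
      = PySem.Chars.join [' '] (ws.map f) := by
  induction ws with
  | nil => exact absurd rfl h
  | cons w rest ih =>
    cases rest with
    | nil => simp [PySem.Chars.join_singleton]
    | cons w' rest' =>
      rw [List.flatMap_cons, List.map_cons, List.map_cons,
        PySem.Chars.join_cons_cons, ← List.map_cons]
      rw [List.dropLast_append_of_ne_nil (by simp [List.flatMap_cons])]
      rw [ih (by simp)]

-- the length of the flatMap row with spaces
theorem pvRowA_eq (ws : List (List Char)) (h : ws ≠ []) (i : Int) :
    String.ofList (PySem.List.slice
        (ws.foldl (fun app word => app ++ (pvHintWordA i word ++ [' '])) [])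
        none (some (((ws.foldl (fun app word => app ++ (pvHintWordA i word ++ [' '])) []).length : Int) - 1)))
      = String.ofList (pvRow ws i.toNat) := by
  rw [PySem.List.foldl_append_eq_flatMap (fun word => pvHintWordA i word ++ [' ']) ws []]
  simp only [List.nil_append]
  set app := ws.flatMap (fun word => pvHintWordA i word ++ [' ']) with happ
  have hlen : 1 ≤ app.length := by
    cases ws with
    | nil => exact absurd rfl h
    | cons w rest => simp [happ, List.flatMap_cons]; omega
  rw [PySem.List.slice_to app (by omega)]
  have : ((app.length : Int) - 1).toNat = app.length - 1 := by omega
  rw [this, ← List.dropLast_eq_take]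
  rw [happ, pvFlatJoin (pvHintWordA i) ws h]
  unfold pvRow
  exact congrArg (fun l => String.ofList (PySem.Chars.join [' '] l))
    (List.map_congr_left (fun w _ => pvHintWordA_eq i w))

-- pvReveal 0 is the all-underscore buffer
theorem pvReveal_zero (w : List Char) : pvReveal 0 w = List.replicate w.length '_' := by
  simp [pvReveal]

-- revealing column p advances a word's buffer one step
theorem pvRevealCol_step (p : Nat) (w : List Char) :
    pvRevealCol p (w, pvReveal p w) = pvReveal (p + 1) w := by
  unfold pvRevealCol pvReveal
  by_cases h : p < w.length
  · simp only [if_pos h]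
    have htl : (w.take p).length = p := List.length_take_of_le (by omega)
    rw [List.set_append, if_neg (by omega), htl, Nat.sub_self]
    have hrep : w.length - p = (w.length - (p + 1)) + 1 := by omega
    rw [hrep, List.replicate_succ, List.set_cons_zero]
    have ht : List.take (p + 1) w = List.take p w ++ [w[p]] := by
      rw [List.take_add_one, List.getElem?_eq_getElem h]; rfl
    have hg : w.getD p '_' = w[p] := by
      simp [List.getD_eq_getElem?_getD, List.getElem?_eq_getElem h]
    rw [hg, ht, List.append_assoc, List.singleton_append]
  · simp only [if_neg h]
    rw [List.take_of_length_le (by omega), List.take_of_length_le (by omega),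
      Nat.sub_eq_zero_of_le (by omega), Nat.sub_eq_zero_of_le (by omega)]

-- B's fold invariant: after processing columns s, s+1, …, s+m-1 starting from the
-- buffers revealed up to s, the buffers are revealed up to s+m and the output has one row per column
theorem pvAltFold (ws : List (List Char)) : ∀ (m s : Nat) (acc : List String),
    (List.range' s m).foldl
      (fun (st : List (List Char) × List String) p =>
        ((ws.zip st.1).map (fun wb => pvRevealCol p wb),
         st.2 ++ [pvRender ((ws.zip st.1).map (fun wb => pvRevealCol p wb))]))
      (ws.map (pvReveal s), acc)
    = (ws.map (pvReveal (s + m)),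
       acc ++ (List.range' s m).map (fun p => String.ofList (pvRow ws (p + 1)))) := by
  intro m
  induction m with
  | zero => intro s acc; simp
  | succ m ih =>
    intro s acc
    rw [List.range'_succ, List.foldl_cons]
    have hstep : (ws.zip (ws.map (pvReveal s))).map (fun wb => pvRevealCol s wb)
        = ws.map (pvReveal (s + 1)) := by
      conv_lhs => rw [show ws.zip (ws.map (pvReveal s))
        = (ws.map id).zip (ws.map (pvReveal s)) by rw [List.map_id]]
      rw [List.zip_map', List.map_map]
      apply List.map_congr_left
      intro w _
      exact pvRevealCol_step s w
    rw [hstep, ih (s + 1)]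
    have hadd : s + 1 + m = s + (m + 1) := by omega
    rw [hadd]
    simp [pvRender, pvRow]

theorem grant_the_hint_eq (txt : String) : grant_the_hint txt = grant_the_hint_alt txt := by
  cases hm : PySem.List.max? ((PySem.Chars.split₀ txt.toList).map (fun x => (x.length : Int)))
      (fun x => x) with
  | none => simp only [grant_the_hint, grant_the_hint_alt, hm]
  | some maximum =>
    have hne : PySem.Chars.split₀ txt.toList ≠ [] := by
      intro h
      have hmem := PySem.List.max?_mem hm
      simp [h] at hmem
    obtain ⟨w, -, hwM⟩ := List.mem_map.mp (PySem.List.max?_mem hm)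
    have hM0 : 0 ≤ maximum := by omega
    simp only [grant_the_hint, grant_the_hint_alt, hm]
    set ws := PySem.Chars.split₀ txt.toList with hws
    -- A's side: fold-append is a map, each row rewrites to pvRow
    rw [PySem.List.foldl_append_singleton_eq_map
      (fun i => String.ofList (PySem.List.slice
        (ws.foldl (fun app word => app ++ (pvHintWordA i word ++ [' '])) [])
        none (some (((ws.foldl (fun app word => app ++ (pvHintWordA i word ++ [' '])) []).length : Int) - 1))))]
    simp only [List.nil_append]
    rw [PySem.List.pyRange_zero, List.map_map]
    have hA : ∀ i ∈ List.range (maximum + 1).toNat,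
        ((fun i => String.ofList (PySem.List.slice
          (ws.foldl (fun app word => app ++ (pvHintWordA i word ++ [' '])) [])
          none (some (((ws.foldl (fun app word => app ++ (pvHintWordA i word ++ [' '])) []).length : Int) - 1)))) ∘ (fun k : Nat => (k : Int))) i
        = String.ofList (pvRow ws i) := by
      intro i _
      simp only [Function.comp]
      rw [pvRowA_eq ws hne (i : Int)]
      simp
    rw [List.map_congr_left hA]
    -- B's side: the fold invariant
    have hbufs : ws.map (fun w => List.replicate w.length '_') = ws.map (pvReveal 0) :=
      List.map_congr_left (fun w _ => (pvReveal_zero w).symm)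
    rw [hbufs]
    have hfold := pvAltFold ws maximum.toNat 0 [pvRender (ws.map (pvReveal 0))]
    rw [← List.range_eq_range'] at hfold
    rw [hfold]
    -- both sides are row 0 followed by rows 1..maximum
    have hT : (maximum + 1).toNat = maximum.toNat + 1 := by omega
    rw [hT, List.range_succ_eq_map, List.map_cons, List.map_map]
    dsimp only
    congr 1

-- ===== VERDICT (by name: the statement is the Claim_ definition above) =====
theorem grant_the_hint_spec : Claim_equal_grant_the_hint := by
  intro txt _ _
  unfold Spec_grant_the_hint
  exact grant_the_hint_eq txt
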